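-- pv_equiv track=rewrite | github.com/2018hsridhar/LEETCODE_REPO_2 | leetcode_3597.py | partitionString
-- ===== SOURCE A (Python) =====
-- from typing import List
--
-- def partitionString(s: str) -> List[str]:
--     seenSegments = set()
--     EMPTY = ""
--     curSegment = EMPTY
--     segments = []
--     for letter in s:
--         curSegment += letter
--         if(curSegment not in seenSegments):
--             seenSegments.add(curSegment)
--             segments.append(curSegment)
--             curSegment = EMPTY
--     return segments
-- ===== SOURCE B (Python) =====
-- from typing import List
--
-- def partitionString(s: str) -> List[str]:
--     # Trie walk: a node exists iff the path word is a previously emitted segment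
--     # (the seen set is prefix-closed), so one O(1) dict probe per character.
--     children = {}      # flat trie: (node_id, char) -> child node_id
--     next_id = 1
--     node = 0           # root
--     cur = []
--     segs = []
--     for ch in s:
--         cur.append(ch)
--         child = children.get((node, ch))
--         if child is None:
--             children[(node, ch)] = next_id
--             next_id += 1
--             segs.append(''.join(cur))
--             cur = []
--             node = 0
--         else:
--             node = child
--     return segs
-- ===== Notes on version B (the rewrite author's own statement) =====
-- stated objective: alternative
-- what changed: B replaces A's hash-set of growing segment strings with a flat trie (dict keyed by (node_id, char)) walked one node per character, so each step probes a constant-size key instead of rehashing the whole current segment.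
import Mathlib
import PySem

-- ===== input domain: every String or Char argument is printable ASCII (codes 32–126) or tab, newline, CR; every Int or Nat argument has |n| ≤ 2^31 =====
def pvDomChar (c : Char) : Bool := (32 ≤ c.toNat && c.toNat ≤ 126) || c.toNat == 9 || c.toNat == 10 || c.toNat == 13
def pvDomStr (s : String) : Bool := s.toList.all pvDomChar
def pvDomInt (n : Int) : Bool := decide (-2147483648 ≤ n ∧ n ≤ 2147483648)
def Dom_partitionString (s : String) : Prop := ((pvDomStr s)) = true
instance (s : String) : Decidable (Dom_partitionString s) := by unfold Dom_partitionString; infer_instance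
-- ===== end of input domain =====

-- B replaces A's hash-set of growing segment strings with a flat trie walked one node
-- per character (an alternative algorithm of the same measured cost; proved equal here).


-- ===== PORT A =====
-- strings handled as List Char (String.ofList at append time), Python set as PySem.Set
def partitionString (s : String) : List String :=
  (s.toList.foldl
    (fun (st : PySem.Set (List Char) × List Char × List String) (letter : Char) =>
      let seen := st.1
      let cur := st.2.1 ++ [letter]
      let segs := st.2.2
      if PySem.Set.contains seen cur then (seen, cur, segs)
      else (PySem.Set.add seen cur, [], segs ++ [String.ofList cur]))
    (PySem.Set.empty, [], [])).2.2

-- ===== PORT B =====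
-- flat trie: children maps (node_id, char) to child node_id; one probe per character
def partitionString_alt (s : String) : List String :=
  (s.toList.foldl
    (fun (st : PySem.Dict (Int × Char) Int × Int × Int × List Char × List String) (ch : Char) =>
      let children := st.1
      let nextId := st.2.1
      let node := st.2.2.1
      let cur := st.2.2.2.1 ++ [ch]
      let segs := st.2.2.2.2
      match children.get? (node, ch) with
      | none => (children.insert (node, ch) nextId, nextId + 1, 0, [], segs ++ [String.ofList cur])
      | some child => (children, nextId, child, cur, segs))
    (PySem.Dict.empty, 1, 0, [], [])).2.2.2.2

-- ===== PRECONDITION & SPEC =====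
def Spec_partitionString (s : String) (out : List String) : Prop := out = partitionString_alt s
instance (s : String) (out : List String) : Decidable (Spec_partitionString s out) := by unfold Spec_partitionString; infer_instance

-- ===== CLAIM (what is proved, stated in full; the proofs are below) =====
def Claim_equal_partitionString : Prop := ∀ (s : String), Dom_partitionString s → Spec_partitionString s (partitionString s)

-- ===== LEMMAS AND PROOFS =====

-- follow the trie from node n along the characters of t
def followFrom (m : PySem.Dict (Int × Char) Int) (n : Int) : List Char → Option Int
  | [] => some n
  | c :: t =>
    match m.get? (n, c) with
    | none => none
    | some n' => followFrom m n' t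

theorem followFrom_append (m : PySem.Dict (Int × Char) Int) (n : Int) (t : List Char) (c : Char) :
    followFrom m n (t ++ [c]) =
      (followFrom m n t).bind (fun x => m.get? (x, c)) := by
  induction t generalizing n with
  | nil => cases hgc : m.get? (n, c) <;> simp [followFrom, hgc]
  | cons d t ih =>
    simp only [List.cons_append, followFrom]
    cases m.get? (n, d) with
    | none => rfl
    | some n' => exact ih n'

-- the invariant tying A's seen-set to B's trie state
def TrieInv (seen : PySem.Set (List Char)) (m : PySem.Dict (Int × Char) Int)
    (cnt node : Int) (cur : List Char) : Prop :=
  followFrom m 0 cur = some node ∧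
  (∀ t : List Char, t ≠ [] → ((followFrom m 0 t).isSome ↔ t ∈ seen)) ∧
  (∀ k v, m.get? k = some v → 1 ≤ v ∧ v < cnt) ∧
  (∀ n c v, m.get? (n, c) = some v → 0 ≤ n ∧ n < cnt) ∧
  1 ≤ cnt ∧
  (∀ t u x, followFrom m 0 t = some x → followFrom m 0 u = some x → t = u)

theorem reach_bound (m : PySem.Dict (Int × Char) Int)
    (hv : ∀ k v, m.get? k = some v → 1 ≤ v ∧ v < cnt) (_hc : 1 ≤ cnt) :
    ∀ (t : List Char) (n x : Int), 0 ≤ n → n < cnt → followFrom m n t = some x → 0 ≤ x ∧ x < cnt := by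
  intro t
  induction t with
  | nil => intro n x h0 h1 h; simp [followFrom] at h; omega
  | cons c t ih =>
    intro n x h0 h1 h
    simp only [followFrom] at h
    cases hg : m.get? (n, c) with
    | none => rw [hg] at h; simp at h
    | some n' =>
      rw [hg] at h
      have := hv _ _ hg
      exact ih n' x (by omega) (by omega) h

-- defined paths survive inserting an edge on a previously-absent key
theorem followFrom_insert_of_defined (m : PySem.Dict (Int × Char) Int)
    (k0 : Int × Char) (w : Int) (habs : m.get? k0 = none) :
    ∀ (t : List Char) (n x : Int), followFrom m n t = some x →
      followFrom (m.insert k0 w) n t = some x := by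
  intro t
  induction t with
  | nil => intro n x h; simpa [followFrom] using h
  | cons c t ih =>
    intro n x h
    simp only [followFrom] at h ⊢
    cases hg : m.get? (n, c) with
    | none => rw [hg] at h; simp at h
    | some n' =>
      rw [hg] at h
      have hne : (n, c) ≠ k0 := by intro he; rw [he, habs] at hg; cases hg
      rw [PySem.Dict.get?_insert_of_ne _ _ hne, hg]
      exact ih n' x h

-- characterize the paths of the trie after inserting a fresh edge
theorem followFrom_insert_cases (m : PySem.Dict (Int × Char) Int)
    (node cnt : Int) (c : Char)
    (_habs : m.get? (node, c) = none)
    (hnoout : ∀ c', m.get? (cnt, c') = none)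
    (hnodecnt : node ≠ cnt) :
    ∀ (t : List Char) (n x : Int),
      followFrom (m.insert (node, c) cnt) n t = some x →
      followFrom m n t = some x ∨
        (∃ u, t = u ++ [c] ∧ followFrom m n u = some node ∧ x = cnt) := by
  intro t
  induction t with
  | nil => intro n x h; left; exact h
  | cons d t ih =>
    intro n x h
    simp only [followFrom] at h
    by_cases hk : (n, d) = ((node, c) : Int × Char)
    · -- took the new edge: lands on cnt which has no outgoing edges
      rw [hk, PySem.Dict.get?_insert_self] at h
      have hcases := ih cnt x h
      have ht : t = [] ∧ x = cnt := by
        rcases hcases with h' | ⟨u, hu, hfu, hx⟩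
        · cases t with
          | nil => simp [followFrom] at h'; exact ⟨rfl, h'.symm⟩
          | cons e t' =>
            simp only [followFrom] at h'
            rw [hnoout e] at h'
            cases h'
        · cases u with
          | nil => simp [followFrom] at hfu; exact absurd hfu.symm hnodecnt
          | cons e u' =>
            simp only [followFrom] at hfu
            rw [hnoout e] at hfu
            cases hfu
      right
      refine ⟨[], ?_, ?_, ht.2⟩
      · rw [ht.1]; cases hk; rfl
      · cases hk; simp [followFrom]
    · rw [PySem.Dict.get?_insert_of_ne _ _ hk] at h
      cases hg : m.get? (n, d) with
      | none => rw [hg] at h; simp at h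
      | some n' =>
        rw [hg] at h
        rcases ih n' x h with h' | ⟨u, hu, hfu, hx⟩
        · left; simp only [followFrom, hg]; exact h'
        · right
          refine ⟨d :: u, by rw [hu, List.cons_append], ?_, hx⟩
          simp only [followFrom, hg]; exact hfu

-- one loop step preserves the invariant and keeps the two states in lockstep
theorem loop_agree (l : List Char) :
    ∀ (seen : PySem.Set (List Char)) (m : PySem.Dict (Int × Char) Int)
      (cnt node : Int) (cur : List Char) (segs : List String),
      TrieInv seen m cnt node cur →
      (l.foldl
        (fun (st : PySem.Set (List Char) × List Char × List String) (letter : Char) =>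
          let seen := st.1
          let cur := st.2.1 ++ [letter]
          let segs := st.2.2
          if PySem.Set.contains seen cur then (seen, cur, segs)
          else (PySem.Set.add seen cur, [], segs ++ [String.ofList cur]))
        (seen, cur, segs)).2.2 =
      (l.foldl
        (fun (st : PySem.Dict (Int × Char) Int × Int × Int × List Char × List String) (ch : Char) =>
          let children := st.1
          let nextId := st.2.1
          let node := st.2.2.1
          let cur := st.2.2.2.1 ++ [ch]
          let segs := st.2.2.2.2
          match children.get? (node, ch) with
          | none => (children.insert (node, ch) nextId, nextId + 1, 0, [], segs ++ [String.ofList cur])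
          | some child => (children, nextId, child, cur, segs))
        (m, cnt, node, cur, segs)).2.2.2.2 := by
  induction l with
  | nil => intro seen m cnt node cur segs _; rfl
  | cons c l ih =>
    intro seen m cnt node cur segs hInv
    obtain ⟨h0, h1, h2, h3, h4, h5⟩ := hInv
    simp only [List.foldl_cons]
    have hext : followFrom m 0 (cur ++ [c]) = m.get? (node, c) := by
      rw [followFrom_append, h0]; rfl
    cases hg : m.get? (node, c) with
    | some child =>
      -- path exists ⇒ segment already seen ⇒ A keeps extending, B walks down
      have hmem : (cur ++ [c]) ∈ seen := by
        have := (h1 (cur ++ [c]) (by simp)).mp (by rw [hext, hg]; rfl)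
        exact this
      have hcont : PySem.Set.contains seen (cur ++ [c]) = true :=
        (PySem.Set.contains_iff _ _).mpr hmem
      simp only [hcont, if_true]
      exact ih seen m cnt child (cur ++ [c]) segs
        ⟨by rw [hext, hg], h1, h2, h3, h4, h5⟩
    | none =>
      -- path absent ⇒ segment unseen ⇒ A cuts, B adds a fresh trie edge
      have hmem : (cur ++ [c]) ∉ seen := by
        intro hmem
        have := (h1 (cur ++ [c]) (by simp)).mpr hmem
        rw [hext, hg] at this; simp at this
      have hcont : PySem.Set.contains seen (cur ++ [c]) = false := by
        cases hc : PySem.Set.contains seen (cur ++ [c])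
        · rfl
        · exact absurd ((PySem.Set.contains_iff _ _).mp hc) hmem
      simp only [hcont, Bool.false_eq_true, if_false]
      have hnode : 0 ≤ node ∧ node < cnt := by
        cases cur with
        | nil => simp [followFrom] at h0; omega
        | cons d cur' =>
          exact reach_bound m h2 h4 (d :: cur') 0 node le_rfl (by omega) h0
      have hnoout : ∀ c', m.get? (cnt, c') = none := by
        intro c'
        cases hq : m.get? (cnt, c') with
        | none => rfl
        | some v => have := h3 _ _ _ hq; omega
      have hnodecnt : node ≠ cnt := by omega
      set m' := m.insert (node, c) cnt with hm'
      -- combined characterization of paths of m'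
      have hchar : ∀ t x, followFrom m' 0 t = some x →
          followFrom m 0 t = some x ∨ (t = cur ++ [c] ∧ x = cnt) := by
        intro t x h
        rcases followFrom_insert_cases m node cnt c hg hnoout hnodecnt t 0 x h with
          h' | ⟨u, hu, hfu, hx⟩
        · left; exact h'
        · right; exact ⟨by rw [hu, h5 u cur node hfu h0], hx⟩
      have hpres := followFrom_insert_of_defined m (node, c) cnt hg
      refine ih (PySem.Set.add seen (cur ++ [c])) m' (cnt + 1) 0 [] (segs ++ [String.ofList (cur ++ [c])])
        ⟨rfl, ?_, ?_, ?_, by omega, ?_⟩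
      · -- membership ↔ path, after the update
        intro t ht
        rw [PySem.Set.mem_add]
        constructor
        · intro hs
          cases hq : followFrom m' 0 t with
          | none => rw [hq] at hs; cases hs
          | some x =>
            rcases hchar t x hq with h' | ⟨he, _⟩
            · exact Or.inl ((h1 t ht).mp (by rw [h']; rfl))
            · exact Or.inr he
        · rintro (hs | rfl)
          · obtain ⟨x, hx⟩ := Option.isSome_iff_exists.mp ((h1 t ht).mpr hs)
            rw [hpres t 0 x hx]; rfl
          · rw [followFrom_append, hpres cur 0 node h0]
            simp only [Option.bind_some, hm', PySem.Dict.get?_insert_self]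
            rfl
      · -- value bounds
        intro k v hkv
        by_cases hk : k = ((node, c) : Int × Char)
        · rw [hk, hm', PySem.Dict.get?_insert_self] at hkv
          cases hkv; omega
        · rw [hm', PySem.Dict.get?_insert_of_ne _ _ hk] at hkv
          have := h2 _ _ hkv; omega
      · -- source bounds
        intro n c' v hkv
        by_cases hk : ((n, c') : Int × Char) = (node, c)
        · cases hk; omega
        · rw [hm', PySem.Dict.get?_insert_of_ne _ _ hk] at hkv
          have := h3 _ _ _ hkv; omega
      · -- injectivity of path-following on the updated trie
        intro t u x htx hux
        rcases hchar t x htx with ht' | ⟨het, hxt⟩ <;>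
          rcases hchar u x hux with hu' | ⟨heu, hxu⟩
        · exact h5 t u x ht' hu'
        · rw [hxu] at ht'
          have := reach_bound m h2 h4 t 0 cnt le_rfl (by omega) ht'
          omega
        · rw [hxt] at hu'
          have := reach_bound m h2 h4 u 0 cnt le_rfl (by omega) hu'
          omega
        · rw [het, heu]

-- ===== VERDICT (by name: the statement is the Claim_ definition above) =====
theorem partitionString_spec : Claim_equal_partitionString := by
  intro s _
  unfold Spec_partitionString partitionString partitionString_alt
  refine loop_agree s.toList PySem.Set.empty PySem.Dict.empty 1 0 [] [] ?_
  refine ⟨rfl, ?_, ?_, ?_, le_rfl, ?_⟩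
  · intro t ht
    cases t with
    | nil => exact absurd rfl ht
    | cons c t => simp [followFrom, PySem.Dict.get?_empty, PySem.Set.empty]
  · intro k v h; rw [PySem.Dict.get?_empty] at h; cases h
  · intro n c v h; rw [PySem.Dict.get?_empty] at h; cases h
  · intro t u x ht hu
    cases t with
    | nil =>
      cases u with
      | nil => rfl
      | cons d u' => simp [followFrom, PySem.Dict.get?_empty] at hu
    | cons d t' => simp [followFrom, PySem.Dict.get?_empty] at ht
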